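-- pv_equiv track=rewrite | github.com/glenn-edgar/knowledge_base_container | building_blocks/python/knowledge_base/kb_python/postgres/data_structures/kb_rpc_server.py | _is_valid_ltree
-- ===== SOURCE A (Python) =====
-- def _is_valid_ltree(path):
--     """
--     Validate if a string is a valid ltree path.
--
--     Args:
--         path (str): The path to validate
--
--     Returns:
--         bool: True if valid, False otherwise
--     """
--     if not path or not isinstance(path, str):
--         return False
--
--     # Basic ltree validation - each label must start with a letter or underscore
--     # and contain only letters, numbers, and underscores
--     parts = path.split('.')
--     if not parts:
--         return False
--
--     for part in parts:
--         if not part: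
--             return False
--         if not (part[0].isalpha() or part[0] == '_'):
--             return False
--         if not all(c.isalnum() or c == '_' for c in part):
--             return False
--
--     return True
-- ===== SOURCE B (Python) =====
-- def _is_valid_ltree(path):
--     """Single char-by-char scan with a 'label start' flag; no splitting."""
--     if not path or not isinstance(path, str):
--         return False
--     ok = True
--     start = True
--     for c in path:
--         if not ok:
--             break
--         if c == '.':
--             ok = not start
--             start = True
--         elif start:
--             ok = c.isalpha() or c == '_'
--             start = False
--         else:
--             ok = c.isalnum() or c == '_'
--             start = False
--     return ok and not start
-- ===== Notes on version B (the rewrite author's own statement) =====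
-- stated objective: alternative
-- what changed: Replaces splitting the path on dots and then checking each label with a single character-by-character scan that carries a boolean flag marking whether the next character begins a label; no list of labels is ever built.
import Mathlib
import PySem

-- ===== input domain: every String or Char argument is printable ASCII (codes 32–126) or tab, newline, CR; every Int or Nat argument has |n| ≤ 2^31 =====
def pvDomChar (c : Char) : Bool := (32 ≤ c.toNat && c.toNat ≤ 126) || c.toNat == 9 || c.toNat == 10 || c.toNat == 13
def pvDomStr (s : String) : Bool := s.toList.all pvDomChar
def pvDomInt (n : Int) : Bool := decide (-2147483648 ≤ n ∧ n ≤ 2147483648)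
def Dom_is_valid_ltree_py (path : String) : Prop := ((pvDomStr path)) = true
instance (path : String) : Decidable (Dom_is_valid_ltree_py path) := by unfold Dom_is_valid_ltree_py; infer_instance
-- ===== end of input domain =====

-- B replaces A's split('.') + per-label checks by one char scan with a label-start flag; same cost, no label list.

-- ===== PORT A =====
-- per-part test of A's loop body (the three early-return checks, in order)
def pvPartOK (part : List Char) : Bool :=
  if part.isEmpty then false
  else
    (match part with
     | [] => false
     | c :: _ => PySem.Chars.isalpha c || c == '_') &&
    part.all (fun c => PySem.Chars.isalnum c || c == '_')

def is_valid_ltree_py (path : String) : Bool :=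
  if path.toList.isEmpty then false      -- `not path` (isinstance is always true for a str argument)
  else
    let parts := PySem.Chars.splitOn path.toList ['.']
    if parts.isEmpty then false
    else parts.all pvPartOK

-- ===== PORT B =====
-- one step of the scan: state = (ok, start)
def pvStep (st : Bool × Bool) (c : Char) : Bool × Bool :=
  if !st.1 then st
  else if c == '.' then (!st.2, true)
  else if st.2 then (PySem.Chars.isalpha c || c == '_', false)
  else (PySem.Chars.isalnum c || c == '_', false)

def is_valid_ltree_py_alt (path : String) : Bool :=
  if path.toList.isEmpty then false
  else
    let r := path.toList.foldl pvStep (true, true)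
    r.1 && !r.2

-- ===== PRECONDITION & SPEC =====
def Spec_is_valid_ltree_py (path : String) (out : Bool) : Prop := out = is_valid_ltree_py_alt path
instance (path : String) (out : Bool) : Decidable (Spec_is_valid_ltree_py path out) := by unfold Spec_is_valid_ltree_py; infer_instance

-- ===== CLAIM (what is proved, stated in full; the proofs are below) =====
def Claim_equal_is_valid_ltree_py : Prop := ∀ (path : String), Dom_is_valid_ltree_py path → Spec_is_valid_ltree_py path (is_valid_ltree_py path)

-- ===== LEMMAS AND PROOFS =====

-- pure splitter on a single '.' separator; cur is the current label read so far, reversed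
def pvSplit : List Char → List Char → List (List Char)
  | [], cur => [cur.reverse]
  | c :: rest, cur => if c = '.' then cur.reverse :: pvSplit rest [] else pvSplit rest (c :: cur)

theorem pvSplit_go (sep : List Char) (hsep : sep = ['.']) :
    ∀ (fuel : Nat) (l cur : List Char) (acc : List (List Char)), l.length < fuel →
      PySem.Chars.splitOn.go sep fuel l cur acc = acc.reverse ++ pvSplit l cur := by
  subst hsep
  intro fuel
  induction fuel with
  | zero => intro l cur acc h; omega
  | succ n ih =>
    intro l cur acc h
    cases l with
    | nil => simp [PySem.Chars.splitOn.go, pvSplit]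
    | cons c rest =>
      by_cases hc : c = '.'
      · subst hc
        have : List.isPrefixOf ['.'] ('.' :: rest) = true := by simp [List.isPrefixOf]
        rw [show PySem.Chars.splitOn.go ['.'] (n+1) ('.' :: rest) cur acc =
              PySem.Chars.splitOn.go ['.'] n (List.drop 1 ('.' :: rest)) [] (cur.reverse :: acc) by
            simp [PySem.Chars.splitOn.go, this]]
        simp only [List.drop_succ_cons, List.drop_zero]
        rw [ih rest [] (cur.reverse :: acc) (by simpa using Nat.lt_of_succ_lt_succ h)]
        simp [pvSplit]
      · have hpre : List.isPrefixOf ['.'] (c :: rest) = false := by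
          simp [List.isPrefixOf]; exact fun hh => hc hh.symm
        rw [show PySem.Chars.splitOn.go ['.'] (n+1) (c :: rest) cur acc =
              PySem.Chars.splitOn.go ['.'] n rest (c :: cur) acc by
            simp [PySem.Chars.splitOn.go, hpre]]
        rw [ih rest (c :: cur) acc (by simpa using Nat.lt_of_succ_lt_succ h)]
        simp [pvSplit, hc]

theorem pvSplitOn_eq (cs : List Char) :
    PySem.Chars.splitOn cs ['.'] = pvSplit cs [] := by
  unfold PySem.Chars.splitOn
  rw [pvSplit_go ['.'] rfl (cs.length + 1) cs [] [] (by omega)]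
  simp

-- the first part of pvSplit cs cur extends cur.reverse
theorem pvSplit_head (cs : List Char) :
    ∀ cur, ∃ t rest, pvSplit cs cur = (cur.reverse ++ t) :: rest := by
  induction cs with
  | nil => intro cur; exact ⟨[], [], by simp [pvSplit]⟩
  | cons c rest ih =>
    intro cur
    by_cases hc : c = '.'
    · exact ⟨[], pvSplit rest [], by simp [pvSplit, hc]⟩
    · obtain ⟨t, r, ht⟩ := ih (c :: cur)
      exact ⟨c :: t, r, by simp [pvSplit, hc, ht]⟩

theorem pvStep_dead (cs : List Char) : ∀ st : Bool, cs.foldl pvStep (false, st) = (false, st) := by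
  induction cs with
  | nil => intro st; rfl
  | cons c rest ih => intro st; simp [List.foldl_cons, pvStep]; exact ih st

theorem pvPartOK_append (xs : List Char) (c : Char) (hxs : xs ≠ []) :
    pvPartOK (xs ++ [c]) = (pvPartOK xs && (PySem.Chars.isalnum c || c == '_')) := by
  cases xs with
  | nil => exact absurd rfl hxs
  | cons x t => simp [pvPartOK, List.all_append, Bool.and_assoc]

theorem pvPartOK_head_false (t : List Char) (c : Char)
    (hc : (PySem.Chars.isalpha c || c == '_') = false) :
    pvPartOK (c :: t) = false := by
  simp [pvPartOK, hc]

theorem pvPartOK_mem_false (p : List Char) (c : Char) (hm : c ∈ p)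
    (hc : (PySem.Chars.isalnum c || c == '_') = false) :
    pvPartOK p = false := by
  cases p with
  | nil => rfl
  | cons x t =>
    have : (x :: t).all (fun c => PySem.Chars.isalnum c || c == '_') = false := by
      rw [List.all_eq_false]; exact ⟨c, hm, by simp [hc]⟩
    simp [pvPartOK, this]

theorem pvMain (cs : List Char) :
    ((cs.foldl pvStep (true, true)).1 && !(cs.foldl pvStep (true, true)).2)
      = (pvSplit cs []).all pvPartOK
    ∧ ∀ cur, pvPartOK cur.reverse = true →
        ((cs.foldl pvStep (true, false)).1 && !(cs.foldl pvStep (true, false)).2)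
          = (pvSplit cs cur).all pvPartOK := by
  induction cs with
  | nil =>
    constructor
    · simp [pvSplit, pvPartOK]
    · intro cur h; simp [pvSplit, h]
  | cons c rest ih =>
    have hdead := pvStep_dead rest
    constructor
    · -- start state
      by_cases hc : c = '.'
      · subst hc
        have hstep : pvStep (true, true) '.' = (false, true) := by simp [pvStep]
        simp only [List.foldl_cons, hstep, hdead]
        simp [pvSplit, pvPartOK]
      · by_cases hh : (PySem.Chars.isalpha c || c == '_') = true
        · have hb : (PySem.Chars.isalnum c || c == '_') = true := by
            rcases Bool.or_eq_true_iff.mp hh with h1 | h1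
            · simp [PySem.Chars.isalnum, h1]
            · simp [h1]
          have hcur : pvPartOK [c].reverse = true := by
            simp [pvPartOK, hh, hb]
          have hstep : pvStep (true, true) c = (true, false) := by
            simp [pvStep, hc, hh]
          simp only [List.foldl_cons, hstep]
          rw [ih.2 [c] hcur]
          simp [pvSplit, hc]
        · have hh' : (PySem.Chars.isalpha c || c == '_') = false := by
            simpa using hh
          have hstep : pvStep (true, true) c = (false, false) := by
            simp [pvStep, hc, hh']
          obtain ⟨t, r, ht⟩ := pvSplit_head rest [c]
          have hf : pvPartOK (c :: t) = false := pvPartOK_head_false t c hh'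
          simp only [List.foldl_cons, hstep, hdead]
          simp [pvSplit, hc, ht, hf]
    · -- inside a label, cur valid so far
      intro cur hcurok
      by_cases hc : c = '.'
      · subst hc
        have hstep : pvStep (true, false) '.' = (true, true) := by simp [pvStep]
        simp only [List.foldl_cons, hstep]
        rw [ih.1]
        simp [pvSplit, hcurok]
      · by_cases hb : (PySem.Chars.isalnum c || c == '_') = true
        · have hne : cur.reverse ≠ [] := by
            intro h; rw [h] at hcurok; simp [pvPartOK] at hcurok
          have hcur' : pvPartOK (c :: cur).reverse = true := by
            simp only [List.reverse_cons]
            rw [pvPartOK_append cur.reverse c hne]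
            simp [hcurok, hb]
          have hstep : pvStep (true, false) c = (true, false) := by
            simp [pvStep, hc, hb]
          simp only [List.foldl_cons, hstep]
          rw [ih.2 (c :: cur) hcur']
          simp [pvSplit, hc]
        · have hb' : (PySem.Chars.isalnum c || c == '_') = false := by simpa using hb
          have hstep : pvStep (true, false) c = (false, false) := by
            simp [pvStep, hc, hb']
          obtain ⟨t, r, ht⟩ := pvSplit_head rest (c :: cur)
          have hfalse : pvPartOK (cur.reverse ++ c :: t) = false := by
            have := pvPartOK_mem_false ((c :: cur).reverse ++ t) c (by simp) hb'
            simpa [List.append_assoc] using this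
          simp only [List.foldl_cons, hstep, hdead]
          simp [pvSplit, hc, ht, hfalse]

-- ===== VERDICT (by name: the statement is the Claim_ definition above) =====
theorem is_valid_ltree_py_spec : Claim_equal_is_valid_ltree_py := by
  intro path _
  unfold Spec_is_valid_ltree_py is_valid_ltree_py is_valid_ltree_py_alt
  cases he : path.toList.isEmpty with
  | true => simp
  | false =>
    simp only [Bool.false_eq_true, if_false]
    rw [pvSplitOn_eq]
    obtain ⟨t, r, ht⟩ := pvSplit_head path.toList []
    have hne : (pvSplit path.toList []).isEmpty = false := by simp [ht]
    simp only [hne, Bool.false_eq_true, if_false]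
    exact ((pvMain path.toList).1).symm
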